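-- pv_equiv track=rewrite | github.com/heyitssat/Escaping-the-Caves | Assignment4/breaking_spn.py | break_sbox
-- ===== SOURCE A (Python) =====
-- def break_sbox(sbox):
--     size_sbox = len(sbox)
--
--     def getno(n):
--         c = 0
--         while(n):
--             if(n%2==1):
--                 c+=1
--             n=int(n/2)
--         return c
--
--     def bias(inp_mask, out_mask):
--         count = 0
--         for (inp, outp) in enumerate(sbox):
--             if ((getno(inp & inp_mask) + getno(outp & out_mask)) % 2 == 0):
--                 count += 1
--         return count
--
--     def pairs(size):
--         return [(im, om) for im in range(size) for om in range(size)]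
--
--     counts = {
--             (im, om) : bias(im, om) for (im, om) in pairs(size_sbox)
--             }
--     return counts
-- ===== SOURCE B (Python) =====
-- def _wht(f):
--     # recursive Walsh-Hadamard transform (length of f is a power of two)
--     if len(f) <= 1:
--         return f
--     h = len(f) // 2
--     L = _wht(f[:h])
--     R = _wht(f[h:])
--     return [a + b for a, b in zip(L, R)] + [a - b for a, b in zip(L, R)]
--
--
-- def break_sbox(sbox):
--     n = len(sbox)
--     N = 1
--     while N < n:
--         N *= 2
--     cols = []
--     for om in range(n):
--         f = [1 - 2 * ((s & om).bit_count() % 2) for s in sbox] + [0] * (N - n)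
--         cols.append(_wht(f))
--     return {(im, om): (n + cols[om][im]) // 2 for im in range(n) for om in range(n)}
-- ===== Notes on version B (the rewrite author's own statement) =====
-- stated objective: faster
-- what changed: Replaces the per-pair O(n log n) bias scan (popcount loops inside a triple loop) by one Walsh-Hadamard transform per output mask on a zero-padded +/-1 column, converting correlations back to counts with (n + F[im]) // 2.
import Mathlib
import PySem

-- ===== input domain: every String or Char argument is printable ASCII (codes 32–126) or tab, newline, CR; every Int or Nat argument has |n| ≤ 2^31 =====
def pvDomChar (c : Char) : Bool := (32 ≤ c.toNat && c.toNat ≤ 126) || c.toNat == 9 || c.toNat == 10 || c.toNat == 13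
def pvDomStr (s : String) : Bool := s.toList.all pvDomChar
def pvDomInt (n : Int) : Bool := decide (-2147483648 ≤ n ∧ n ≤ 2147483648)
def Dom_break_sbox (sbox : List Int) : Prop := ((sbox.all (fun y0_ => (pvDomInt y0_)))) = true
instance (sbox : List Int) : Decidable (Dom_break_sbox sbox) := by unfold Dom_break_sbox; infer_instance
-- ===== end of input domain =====

-- B replaces A's per-(im,om) popcount scan by one Walsh-Hadamard transform per output mask
-- (objective: faster, asymptotically).

-- ===== PORT A =====
-- helper `getno` of A: while(n): if n%2==1: c+=1; n=int(n/2)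
def pvGetnoLoop (c n : Int) : Int :=
  if n = 0 then c
  else pvGetnoLoop (if PySem.Int.mod n 2 = 1 then c + 1 else c) (PySem.Int.truncdiv n 2)
termination_by n.natAbs
decreasing_by
  rename_i hn
  have h2 : PySem.Int.truncdiv n 2 = n.tdiv 2 := by simp [PySem.Int.truncdiv]
  rw [h2, Int.natAbs_tdiv]
  have h3 : (2:Int).natAbs = 2 := rfl
  rw [h3]
  exact Nat.div_lt_self (Int.natAbs_pos.mpr hn) (by norm_num)

def pvGetno (n : Int) : Int := pvGetnoLoop 0 n

-- helper `bias` of A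
def pvBias (sbox : List Int) (im om : Int) : Int :=
  (PySem.List.enumerate sbox 0).foldl
    (fun count p =>
      if PySem.Int.mod (pvGetno (PySem.Int.band p.1 im) + pvGetno (PySem.Int.band p.2 om)) 2 = 0
      then count + 1 else count) 0

def break_sbox (sbox : List Int) : List (Int × Int × Int) :=
  let size := PySem.List.len sbox
  ((PySem.List.pyRange 0 size 1).flatMap (fun im =>
      (PySem.List.pyRange 0 size 1).map (fun om => (im, om)))).map
    (fun p => (p.1, p.2, pvBias sbox p.1 p.2))

-- ===== PORT B =====
-- recursive Walsh-Hadamard transform (helper `_wht` of B)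
def pvWht (f : List Int) : List Int :=
  if f.length ≤ 1 then f
  else
    let h := f.length / 2
    let L := pvWht (f.take h)
    let R := pvWht (f.drop h)
    List.zipWith (· + ·) L R ++ List.zipWith (· - ·) L R
termination_by f.length
decreasing_by
  · simp only [List.length_take]; omega
  · simp only [List.length_drop]; omega

-- `N = 1; while N < n: N *= 2`  (positivity of N carried for termination)
def pvGrow (n N : Nat) (hN : 0 < N) : Nat :=
  if N < n then pvGrow n (2 * N) (by omega) else N
termination_by n - N

def break_sbox_alt (sbox : List Int) : List (Int × Int × Int) :=
  let n := sbox.length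
  let N := pvGrow n 1 (by omega)
  let cols := (PySem.List.pyRange 0 (n : Int) 1).map (fun om =>
    pvWht (sbox.map (fun s => 1 - 2 * (((PySem.Int.bitCount (PySem.Int.band s om)) % 2 : Nat) : Int))
           ++ List.replicate (N - n) 0))
  (PySem.List.pyRange 0 (n : Int) 1).flatMap (fun im =>
    (PySem.List.pyRange 0 (n : Int) 1).map (fun om =>
      (im, om, PySem.Int.floordiv ((n : Int) + PySem.List.pyGetD (PySem.List.pyGetD cols om []) im 0) 2)))

-- ===== PRECONDITION & SPEC =====
def Spec_break_sbox (sbox : List Int) (out : List (Int × Int × Int)) : Prop := out = break_sbox_alt sbox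
instance (sbox : List Int) (out : List (Int × Int × Int)) : Decidable (Spec_break_sbox sbox out) := by unfold Spec_break_sbox; infer_instance

-- ===== CLAIM (what is proved, stated in full; the proofs are below) =====
def Claim_equal_break_sbox : Prop := ∀ (sbox : List Int), Dom_break_sbox sbox → Spec_break_sbox sbox (break_sbox sbox)

-- ===== LEMMAS AND PROOFS =====

-- popcount of a natural number, parity sign
def pvPc (x : Nat) : Nat := PySem.Int.bitCount (x : Int)
def pvSgn (x : Nat) : Int := if pvPc x % 2 = 0 then 1 else -1
-- the Walsh sum Σ_{j<len} (-1)^{popcount(j&m)} g j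
def pvSsum (g : Nat → Int) (m len : Nat) : Int :=
  ∑ j ∈ Finset.range len, pvSgn (j &&& m) * g j

lemma pvPc_split (x : Nat) (hx : 0 < x) : pvPc x = x % 2 + pvPc (x / 2) :=
  PySem.Int.bitCount_natCast hx

lemma pvGetnoLoop_eq (c : Int) (x : Nat) : pvGetnoLoop c (x : Int) = c + (pvPc x : Int) := by
  induction x using Nat.strong_induction_on generalizing c with
  | _ x ih =>
    rw [pvGetnoLoop]
    rcases Nat.eq_zero_or_pos x with h | h
    · subst h; simp [pvPc]
    · have hx0 : (x : Int) ≠ 0 := by exact_mod_cast Nat.pos_iff_ne_zero.mp h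
      rw [if_neg hx0]
      have hmod : PySem.Int.mod (x : Int) 2 = ((x % 2 : Nat) : Int) := by
        exact_mod_cast PySem.Int.mod_natCast x 2
      have hdiv : PySem.Int.truncdiv (x : Int) 2 = ((x / 2 : Nat) : Int) := by
        have h1 : PySem.Int.truncdiv (x : Int) 2 = (x : Int).tdiv 2 := by
          simp [PySem.Int.truncdiv]
        rw [h1]; rfl
      rw [hmod, hdiv, ih (x / 2) (Nat.div_lt_self h (by norm_num)), pvPc_split x h]
      rcases Nat.mod_two_eq_zero_or_one x with h2 | h2 <;> simp [h2]; ring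

lemma pvPc_add_pow (k : Nat) : ∀ x < 2 ^ k, pvPc (2 ^ k + x) = pvPc x + 1 := by
  induction k with
  | zero =>
    intro x hx
    interval_cases x
    decide
  | succ k ih =>
    intro x hx
    have h2 : 2 ^ (k + 1) = 2 * 2 ^ k := by ring
    have hpos : 0 < 2 ^ (k + 1) + x := by positivity
    rw [pvPc_split _ hpos]
    have e1 : (2 ^ (k + 1) + x) % 2 = x % 2 := by omega
    have e2 : (2 ^ (k + 1) + x) / 2 = 2 ^ k + x / 2 := by omega
    rw [e1, e2, ih (x / 2) (by omega)]
    rcases Nat.eq_zero_or_pos x with h | h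
    · subst h; simp [pvPc]
    · rw [pvPc_split x h]; omega

lemma pvLand_add_pow_left (k j m : Nat) (hj : j < 2 ^ k) (hm : m < 2 ^ k) :
    (2 ^ k + j) &&& m = j &&& m := by
  apply Nat.eq_of_testBit_eq
  intro i
  rcases lt_trichotomy i k with h | h | h
  · simp [Nat.testBit_and, Nat.testBit_two_pow_add_gt h]
  · subst h
    simp [Nat.testBit_and, Nat.testBit_lt_two_pow hm]
  · have hki : 2 ^ k + j < 2 ^ i := by
      calc 2 ^ k + j < 2 ^ k + 2 ^ k := by omega
      _ = 2 ^ (k + 1) := by ring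
      _ ≤ 2 ^ i := Nat.pow_le_pow_right (by norm_num) h
    have hji : j < 2 ^ i := by omega
    have hmi : m < 2 ^ i := by omega
    simp [Nat.testBit_and, Nat.testBit_lt_two_pow hki, Nat.testBit_lt_two_pow hji,
      Nat.testBit_lt_two_pow hmi]

lemma pvLand_add_pow_both (k j m : Nat) (hj : j < 2 ^ k) (hm : m < 2 ^ k) :
    (2 ^ k + j) &&& (2 ^ k + m) = 2 ^ k + (j &&& m) := by
  have hlt : j &&& m < 2 ^ k := lt_of_le_of_lt Nat.and_le_left hj
  apply Nat.eq_of_testBit_eq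
  intro i
  rcases lt_trichotomy i k with h | h | h
  · simp [Nat.testBit_and, Nat.testBit_two_pow_add_gt h]
  · subst h
    simp [Nat.testBit_and, Nat.testBit_two_pow_add_eq, Nat.testBit_lt_two_pow hj,
      Nat.testBit_lt_two_pow hm, Nat.testBit_lt_two_pow hlt]
  · have h1 : 2 ^ k + j < 2 ^ i := by
      have h5 : 2 ^ (k + 1) ≤ 2 ^ i := Nat.pow_le_pow_right (by norm_num) h
      have h6 : 2 ^ (k + 1) = 2 * 2 ^ k := by ring
      omega
    have h2 : 2 ^ k + m < 2 ^ i := by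
      have h5 : 2 ^ (k + 1) ≤ 2 ^ i := Nat.pow_le_pow_right (by norm_num) h
      have h6 : 2 ^ (k + 1) = 2 * 2 ^ k := by ring
      omega
    have h4 : 2 ^ k + (j &&& m) < 2 ^ i := by
      have h5 : 2 ^ (k + 1) ≤ 2 ^ i := Nat.pow_le_pow_right (by norm_num) h
      have h6 : 2 ^ (k + 1) = 2 * 2 ^ k := by ring
      omega
    simp [Nat.testBit_and, Nat.testBit_lt_two_pow h1, Nat.testBit_lt_two_pow h2,
      Nat.testBit_lt_two_pow h4]

lemma pvSgn_add_pow (k x : Nat) (hx : x < 2 ^ k) : pvSgn (2 ^ k + x) = -pvSgn x := by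
  unfold pvSgn
  rw [pvPc_add_pow k x hx]
  rcases Nat.mod_two_eq_zero_or_one (pvPc x) with h | h <;> simp [h, Nat.add_mod]

lemma pvWht_correct (k : Nat) : ∀ f : List Int, f.length = 2 ^ k →
    (pvWht f).length = 2 ^ k ∧
    ∀ m < 2 ^ k, (pvWht f).getD m 0 = pvSsum (fun j => f.getD j 0) m (2 ^ k) := by
  induction k with
  | zero =>
    intro f hf
    simp only [pow_zero] at hf ⊢
    rw [pvWht, if_pos (by omega)]
    refine ⟨hf, ?_⟩
    intro m hm
    interval_cases m
    simp [pvSsum, pvSgn, pvPc]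
  | succ k ih =>
    intro f hf
    have hpos : 0 < 2 ^ k := by positivity
    have h2 : 2 ^ (k + 1) = 2 ^ k + 2 ^ k := by ring
    have hge : ¬ f.length ≤ 1 := by rw [hf]; omega
    have hhalf : f.length / 2 = 2 ^ k := by rw [hf]; omega
    have htake : (f.take (f.length / 2)).length = 2 ^ k := by
      simp [List.length_take, hf]; omega
    have hdrop : (f.drop (f.length / 2)).length = 2 ^ k := by
      simp [List.length_drop, hf]; omega
    obtain ⟨hL, ihL⟩ := ih (f.take (f.length / 2)) htake
    obtain ⟨hR, ihR⟩ := ih (f.drop (f.length / 2)) hdrop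
    rw [pvWht, if_neg hge]
    simp only []
    set L := pvWht (f.take (f.length / 2)) with hLdef
    set R := pvWht (f.drop (f.length / 2)) with hRdef
    have hzl : (List.zipWith (· + ·) L R).length = 2 ^ k := by
      simp [List.length_zipWith, hL, hR]
    have hzl2 : (List.zipWith (· - ·) L R).length = 2 ^ k := by
      simp [List.length_zipWith, hL, hR]
    constructor
    · simp [List.length_append, hzl, hzl2]; omega
    intro m hm
    -- getD of f.take / f.drop in terms of f
    have hgtake : ∀ j, j < 2 ^ k → (f.take (f.length / 2)).getD j 0 = f.getD j 0 := by
      intro j hj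
      rw [List.getD_eq_getElem?_getD, List.getD_eq_getElem?_getD, List.getElem?_take]
      rw [hhalf, if_pos hj]
    have hgdrop : ∀ j, j < 2 ^ k → (f.drop (f.length / 2)).getD j 0 = f.getD (2 ^ k + j) 0 := by
      intro j hj
      rw [List.getD_eq_getElem?_getD, List.getD_eq_getElem?_getD, List.getElem?_drop, hhalf]
    -- split the spec sum
    have hsplit : ∀ m' : Nat, pvSsum (fun j => f.getD j 0) m' (2 ^ (k+1)) =
        (∑ j ∈ Finset.range (2 ^ k), pvSgn (j &&& m') * f.getD j 0)
        + ∑ j ∈ Finset.range (2 ^ k), pvSgn ((2 ^ k + j) &&& m') * f.getD (2 ^ k + j) 0 := by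
      intro m'
      rw [pvSsum, h2, Finset.sum_range_add]
    by_cases hcase : m < 2 ^ k
    · -- left half: (L+R)[m]
      have hidx : (List.zipWith (· + ·) L R ++ List.zipWith (· - ·) L R).getD m 0
          = L.getD m 0 + R.getD m 0 := by
        rw [List.getD_eq_getElem?_getD, List.getElem?_append_left (by omega), List.getElem?_zipWith]
        have h1 : L[m]? = some (L.getD m 0) := by
          rw [List.getD_eq_getElem?_getD]
          cases h : L[m]? with
          | none => exact absurd (List.getElem?_eq_none_iff.mp h) (by omega)
          | some v => rfl
        have h1' : R[m]? = some (R.getD m 0) := by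
          rw [List.getD_eq_getElem?_getD]
          cases h : R[m]? with
          | none => exact absurd (List.getElem?_eq_none_iff.mp h) (by omega)
          | some v => rfl
        rw [h1, h1']; rfl
      rw [hidx, ihL m hcase, ihR m hcase, hsplit m]
      congr 1
      · rw [pvSsum]; exact Finset.sum_congr rfl (fun j hj => by
          rw [hgtake j (Finset.mem_range.mp hj)])
      · rw [pvSsum]; exact Finset.sum_congr rfl (fun j hj => by
          have hjk := Finset.mem_range.mp hj
          rw [hgdrop j hjk, pvLand_add_pow_left k j m hjk hcase])
    · -- right half: m = 2^k + m'
      obtain ⟨m', rfl⟩ : ∃ m', m = 2 ^ k + m' := ⟨m - 2 ^ k, by omega⟩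
      have hm' : m' < 2 ^ k := by omega
      have hidx : (List.zipWith (· + ·) L R ++ List.zipWith (· - ·) L R).getD (2 ^ k + m') 0
          = L.getD m' 0 - R.getD m' 0 := by
        rw [List.getD_eq_getElem?_getD, List.getElem?_append_right (by omega)]
        rw [hzl]
        have : 2 ^ k + m' - 2 ^ k = m' := by omega
        rw [this, List.getElem?_zipWith]
        have h1 : L[m']? = some (L.getD m' 0) := by
          rw [List.getD_eq_getElem?_getD]
          cases h : L[m']? with
          | none => exact absurd (List.getElem?_eq_none_iff.mp h) (by omega)
          | some v => rfl
        have h1' : R[m']? = some (R.getD m' 0) := by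
          rw [List.getD_eq_getElem?_getD]
          cases h : R[m']? with
          | none => exact absurd (List.getElem?_eq_none_iff.mp h) (by omega)
          | some v => rfl
        rw [h1, h1']; rfl
      rw [hidx, ihL m' hm', ihR m' hm', hsplit (2 ^ k + m')]
      have e1 : ∀ j ∈ Finset.range (2 ^ k), pvSgn (j &&& (2 ^ k + m')) * f.getD j 0
          = pvSgn (j &&& m') * (f.take (f.length / 2)).getD j 0 := by
        intro j hj
        have hjk := Finset.mem_range.mp hj
        rw [hgtake j hjk, Nat.land_comm j (2 ^ k + m'), pvLand_add_pow_left k m' j hm' hjk,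
          Nat.land_comm m' j]
      have e2 : ∀ j ∈ Finset.range (2 ^ k), pvSgn ((2 ^ k + j) &&& (2 ^ k + m')) * f.getD (2 ^ k + j) 0
          = -(pvSgn (j &&& m') * (f.drop (f.length / 2)).getD j 0) := by
        intro j hj
        have hjk := Finset.mem_range.mp hj
        have hlt : j &&& m' < 2 ^ k := lt_of_le_of_lt Nat.and_le_left hjk
        rw [hgdrop j hjk, pvLand_add_pow_both k j m' hjk hm', pvSgn_add_pow k _ hlt]
        ring
      rw [Finset.sum_congr rfl e1, Finset.sum_congr rfl e2, Finset.sum_neg_distrib]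
      rw [pvSsum, pvSsum]
      ring


lemma pvGrow_spec (n : Nat) : ∀ N hN, (∃ k, N = 2 ^ k) →
    ∃ k, pvGrow n N hN = 2 ^ k ∧ n ≤ 2 ^ k := by
  intro N hN hpow
  induction N, hN using pvGrow.induct n with
  | case1 N hN hlt ih =>
    rw [pvGrow, if_pos hlt]
    obtain ⟨k, rfl⟩ := hpow
    exact ih ⟨k + 1, by ring⟩
  | case2 N hN hge =>
    rw [pvGrow, if_neg hge]
    obtain ⟨k, rfl⟩ := hpow
    exact ⟨k, rfl, by omega⟩

lemma pvCountP_enumerate (P : Int × Int → Bool) (l : List Int) : ∀ s : Int,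
    ((PySem.List.enumerate l s).countP P : Int)
      = ∑ j ∈ Finset.range l.length, (if P (s + (j : Int), l.getD j 0) = true then (1:Int) else 0) := by
  induction l with
  | nil => simp [PySem.List.enumerate_nil]
  | cons x xs ih =>
    intro s
    rw [PySem.List.enumerate_cons, List.countP_cons]
    simp only [List.length_cons]
    rw [Finset.sum_range_succ']
    push_cast
    rw [ih (s + 1)]
    have h0 : ∀ j : Nat, (x :: xs).getD (j + 1) 0 = xs.getD j 0 := by intro j; simp
    simp only [h0, List.getD_cons_zero]
    have hshift : ∀ j : Nat, (if P (s + ((j : Int) + 1), xs.getD j 0) = true then (1:Int) else 0)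
        = (if P (s + 1 + (j : Int), xs.getD j 0) = true then (1:Int) else 0) := by
      intro j
      have : s + ((j : Int) + 1) = s + 1 + (j : Int) := by ring
      rw [this]
    simp only [hshift]
    ring_nf

-- 2·bias(im,om) = n + Walsh sum of the ±1 column
lemma pvBias_eq (sbox : List Int) (im om : Nat) :
    2 * pvBias sbox (im : Int) (om : Int)
      = (sbox.length : Int) +
        pvSsum (fun j => (sbox.map (fun s =>
            1 - 2 * (((PySem.Int.bitCount (PySem.Int.band s (om : Int))) % 2 : Nat) : Int))).getD j 0)
          im sbox.length := by
  unfold pvBias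
  rw [PySem.List.foldl_ite_add_one
    (p := fun q : Int × Int => PySem.Int.mod
      (pvGetno (PySem.Int.band q.1 (im : Int)) + pvGetno (PySem.Int.band q.2 (om : Int))) 2 = 0)]
  rw [zero_add, pvCountP_enumerate]
  dsimp only
  rw [pvSsum, Finset.mul_sum]
  have hterm : ∀ j ∈ Finset.range sbox.length,
      2 * (if (decide (PySem.Int.mod (pvGetno (PySem.Int.band ((0:Int) + (j : Int)) (im : Int))
              + pvGetno (PySem.Int.band (sbox.getD j 0) (om : Int))) 2 = 0)) = true
            then (1:Int) else 0)
        = 1 + pvSgn (j &&& im) * ((sbox.map (fun s =>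
            1 - 2 * (((PySem.Int.bitCount (PySem.Int.band s (om : Int))) % 2 : Nat) : Int))).getD j 0) := by
    intro j hj
    have hjlen := Finset.mem_range.mp hj
    have hz : (0 : Int) + (j : Int) = ((j : Nat) : Int) := by ring
    rw [hz]
    -- the input-side popcount
    have f1 : PySem.Int.band ((j : Nat) : Int) (im : Int) = ((j &&& im : Nat) : Int) :=
      PySem.Int.band_natCast j im
    have f2 : pvGetno ((j &&& im : Nat) : Int) = ((pvPc (j &&& im) : Nat) : Int) := by
      unfold pvGetno; rw [pvGetnoLoop_eq, zero_add]
    -- the output-side popcount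
    set b : Int := PySem.Int.band (sbox.getD j 0) (om : Int) with hb
    have f3 : 0 ≤ b := by
      rw [hb, PySem.Int.band_comm]
      exact PySem.Int.band_nonneg_of_nonneg_left _ (by positivity)
    have f4 : b = ((b.toNat : Nat) : Int) := (Int.toNat_of_nonneg f3).symm
    have f5 : pvGetno b = ((pvPc b.toNat : Nat) : Int) := by
      conv_lhs => rw [f4]
      unfold pvGetno; rw [pvGetnoLoop_eq, zero_add]
    have f6 : PySem.Int.bitCount b = pvPc b.toNat := by
      conv_lhs => rw [f4]
      rfl
    -- the column entry
    have f7 : (sbox.map (fun s =>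
          1 - 2 * (((PySem.Int.bitCount (PySem.Int.band s (om : Int))) % 2 : Nat) : Int))).getD j 0
        = 1 - 2 * ((pvPc b.toNat % 2 : Nat) : Int) := by
      rw [List.getD_eq_getElem _ _ (by simpa using hjlen), List.getElem_map]
      rw [List.getD_eq_getElem _ _ hjlen] at hb
      rw [← hb, f6]
    -- the condition as a Nat parity
    have f8 : (PySem.Int.mod (pvGetno (PySem.Int.band ((j : Nat) : Int) (im : Int)) + pvGetno b) 2 = 0)
        ↔ ((pvPc (j &&& im) + pvPc b.toNat) % 2 = 0) := by
      rw [f1, f2, f5]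
      have : ((pvPc (j &&& im) : Nat) : Int) + ((pvPc b.toNat : Nat) : Int)
          = ((pvPc (j &&& im) + pvPc b.toNat : Nat) : Int) := by push_cast; ring
      rw [this]
      rw [show PySem.Int.mod ((pvPc (j &&& im) + pvPc b.toNat : Nat) : Int) 2
            = (((pvPc (j &&& im) + pvPc b.toNat) % 2 : Nat) : Int) from
        by exact_mod_cast PySem.Int.mod_natCast _ 2]
      exact_mod_cast Int.ofNat_eq_zero
    rw [f7]
    have hcond : (decide (PySem.Int.mod (pvGetno (PySem.Int.band ((j : Nat) : Int) (im : Int))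
          + pvGetno b) 2 = 0))
        = decide ((pvPc (j &&& im) + pvPc b.toNat) % 2 = 0) := by
      simp only [decide_eq_decide]; exact f8
    rw [hcond]
    unfold pvSgn
    rcases Nat.mod_two_eq_zero_or_one (pvPc (j &&& im)) with h1 | h1 <;>
      rcases Nat.mod_two_eq_zero_or_one (pvPc b.toNat) with h2 | h2 <;>
      simp [h1, h2, Nat.add_mod]
  rw [Finset.sum_congr rfl hterm, Finset.sum_add_distrib, Finset.sum_const, Finset.card_range]
  simp

theorem break_sbox_spec : Claim_equal_break_sbox := by
  intro sbox _
  unfold Spec_break_sbox break_sbox break_sbox_alt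
  simp only [PySem.List.len_eq]
  rw [List.map_flatMap]
  apply List.flatMap_congr
  intro im him
  rw [List.map_map]
  apply List.map_congr_left
  intro om hom
  obtain ⟨him0, himn⟩ := PySem.List.mem_pyRange_one.mp him
  obtain ⟨hom0, homn⟩ := PySem.List.mem_pyRange_one.mp hom
  simp only [Function.comp]
  obtain ⟨i, rfl⟩ : ∃ i : Nat, im = (i : Int) := ⟨im.toNat, (Int.toNat_of_nonneg him0).symm⟩
  obtain ⟨o, rfl⟩ : ∃ o : Nat, om = (o : Int) := ⟨om.toNat, (Int.toNat_of_nonneg hom0).symm⟩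
  have hin : i < sbox.length := by exact_mod_cast himn
  have hon : o < sbox.length := by exact_mod_cast homn
  refine Prod.ext rfl (Prod.ext rfl ?_)
  dsimp only
  -- name the pieces of B
  set n := sbox.length with hn
  obtain ⟨k, hk, hnk⟩ := pvGrow_spec n 1 (by omega) ⟨0, rfl⟩
  set N := pvGrow n 1 (by omega) with hNdef
  set colP : List Int := sbox.map (fun s =>
      1 - 2 * (((PySem.Int.bitCount (PySem.Int.band s (o : Int))) % 2 : Nat) : Int)) with hcolP
  set colF : List Int := colP ++ List.replicate (N - n) 0 with hcolF
  -- resolve the cols lookup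
  rw [PySem.List.pyGetD_map_pyRange_of_nonneg _ _ _ _ (by positivity) (by exact_mod_cast homn)]
  rw [PySem.List.pyGetD_natCast]
  have hlenP : colP.length = n := by rw [hcolP, List.length_map]
  have hlenF : colF.length = 2 ^ k := by
    simp [hcolF, hlenP, List.length_replicate]
    omega
  obtain ⟨-, hwht⟩ := pvWht_correct k colF hlenF
  rw [hwht i (by omega)]
  -- truncate the Walsh sum to the first n entries
  have htrunc : pvSsum (fun j => colF.getD j 0) i (2 ^ k)
      = pvSsum (fun j => colP.getD j 0) i n := by
    rw [pvSsum, pvSsum, show 2 ^ k = n + (2 ^ k - n) by omega, Finset.sum_range_add]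
    have hz : ∀ j ∈ Finset.range (2 ^ k - n), pvSgn ((n + j) &&& i) * colF.getD (n + j) 0
        = 0 := by
      intro j hj
      have : colF.getD (n + j) 0 = 0 := by
        rw [List.getD_eq_getElem?_getD, hcolF, List.getElem?_append_right (by omega)]
        simp only [List.getElem?_replicate]
        split <;> rfl
      rw [this, mul_zero]
    rw [Finset.sum_congr rfl hz, Finset.sum_const_zero, add_zero]
    apply Finset.sum_congr rfl
    intro j hj
    have hjn : j < n := Finset.mem_range.mp hj
    have : colF.getD j 0 = colP.getD j 0 := by
      rw [List.getD_eq_getElem?_getD, List.getD_eq_getElem?_getD, hcolF,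
        List.getElem?_append_left (by omega)]
    rw [this]
  rw [htrunc]
  have hbias := pvBias_eq sbox i o
  rw [hcolP, hn]
  rw [show (sbox.length : Int) + pvSsum (fun j => (sbox.map (fun s =>
      1 - 2 * (((PySem.Int.bitCount (PySem.Int.band s (o : Int))) % 2 : Nat) : Int))).getD j 0)
      i sbox.length = 2 * pvBias sbox (i : Int) (o : Int) from hbias.symm]
  rw [PySem.Int.floordiv_eq_ediv_of_pos (by norm_num)]
  rw [Int.mul_ediv_cancel_left _ (by norm_num)]
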